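-- pv_equiv track=rewrite | github.com/sonambharti/Interview | Amazon/15May2025/Q2minmConnectedZones.py | minmConnectedZones
-- ===== SOURCE A (Python) =====
-- def minmConnectedZones(a, b, k):
--     n = len(a)
--     if n == 0:
--         return 1 # If no intervals exist, return 1 (you need at least one zone, even if artificial)
--
--     segs = [(a[i], b[i]) for i in range(n)] # Create a list of tuples representing intervals.
--     segs.sort() # sort the intervals by starting point to allow linear merging.
--
--     merged = []
--     merged.append(segs[0]) # merge the zones
--     for i in range(1, n):
--         L, R = segs[i]
--         lastL, lastR = merged[-1]
--         # If the next segment overlaps with or touches the last one, merge it.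
--         if L <= lastR:
--             if R > lastR:
--                 merged[-1] = (lastL, R)
--         else:
--             merged.append((L, R))
--
--     m = len(merged) # m: number of disconnected merged zones
--     if m <= 1:
--         return 1   # If only one zone remains, return 1.
--
--     best = 0
--     j = 0
--     for i in range(m):
--         if j < i:
--             j = i
--         # For each merged zone i, try to connect as many next zones as possible with one delivery zone of length ≤ k.
--         while j + 1 < m and merged[j + 1][0] - merged[i][1] <= k:
--             j += 1
--         merges = j - i  # how many zones we can connect from current i.
--         if merges > best:  # Track the maximum number of merges we can do with one added segment of length ≤ k
--             best = merges
--     # If best merges were possible, we reduce the total number of zones by best.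
--     return m - best
-- ===== SOURCE B (Python) =====
-- def minmConnectedZones(a, b, k):
--     n = len(a)
--     if n == 0:
--         return 1
--     segs = sorted(zip(a, b))
--     merged = [segs[0]]
--     for L, R in segs[1:]:
--         lastL, lastR = merged[-1]
--         if L <= lastR:
--             if R > lastR:
--                 merged[-1] = (lastL, R)
--         else:
--             merged.append((L, R))
--     m = len(merged)
--     if m <= 1:
--         return 1
--     starts = [z[0] for z in merged]
--     best = 0
--     for i in range(m):
--         x = merged[i][1] + k
--         lo, hi = 0, m  # hand-rolled bisect_right(starts, x)
--         while lo < hi: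
--             mid = (lo + hi) // 2
--             if starts[mid] <= x:
--                 lo = mid + 1
--             else:
--                 hi = mid
--         merges = lo - 1 - i
--         if merges > best:
--             best = merges
--     return m - best
-- ===== Notes on version B (the rewrite author's own statement) =====
-- stated objective: alternative
-- what changed: The sort and linear interval-merge are kept, but the carried two-pointer while-loop over merged zones is replaced by a per-zone binary search (hand-rolled bisect_right over the list of zone starts) that finds the farthest reachable zone directly.
import Mathlib
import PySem

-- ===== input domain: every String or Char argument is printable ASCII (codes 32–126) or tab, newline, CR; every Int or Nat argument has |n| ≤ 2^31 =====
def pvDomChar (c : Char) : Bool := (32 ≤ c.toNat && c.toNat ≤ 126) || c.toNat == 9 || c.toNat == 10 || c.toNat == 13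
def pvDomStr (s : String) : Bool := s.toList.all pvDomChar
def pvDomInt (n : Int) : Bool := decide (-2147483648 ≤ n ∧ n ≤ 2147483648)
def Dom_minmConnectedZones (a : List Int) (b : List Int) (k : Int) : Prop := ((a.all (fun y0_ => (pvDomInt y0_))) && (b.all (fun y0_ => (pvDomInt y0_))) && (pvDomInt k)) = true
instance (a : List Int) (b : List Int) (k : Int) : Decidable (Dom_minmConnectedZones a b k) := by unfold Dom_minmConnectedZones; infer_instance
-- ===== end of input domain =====

-- B keeps A's sort + linear merge but replaces the carried two-pointer while-loop by a
-- per-zone hand-rolled binary search over the merged zone starts (objective: alternative).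

-- ===== PORT A =====
-- the interval-merge loop (textually identical in A and Source B, so shared):
-- state = merged[-1] plus the already-final prefix (emitted via cons)
def pvMerge : (Int × Int) → List (Int × Int) → List (Int × Int)
  | last, [] => [last]
  | last, s :: t =>
    if s.1 ≤ last.2 then
      if s.2 > last.2 then pvMerge (last.1, s.2) t else pvMerge last t
    else
      last :: pvMerge s t

def pvMerged : List (Int × Int) → List (Int × Int)
  | [] => []
  | s0 :: rest => pvMerge s0 rest

-- the inner while-loop: fuel = len(merged) bounds the number of j increments
def pvAdvA (merged : List (Int × Int)) (m endi k : Int) : Int → Nat → Int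
  | j, 0 => j
  | j, fuel + 1 =>
    if j + 1 < m ∧ (PySem.List.pyGetD merged (j + 1) (0, 0)).1 - endi ≤ k then
      pvAdvA merged m endi k (j + 1) fuel
    else j

-- the body of the for-loop over zones (state = (best, j))
def pvStepA (merged : List (Int × Int)) (m k : Int) (s : Int × Int) (i : Int) : Int × Int :=
  let j0 := if s.2 < i then i else s.2
  let j := pvAdvA merged m (PySem.List.pyGetD merged i (0, 0)).2 k j0 merged.length
  let merges := j - i
  (if merges > s.1 then merges else s.1, j)

def minmConnectedZones (a : List Int) (b : List Int) (k : Int) : Int :=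
  let n := a.length
  if n = 0 then 1 else
  let segs := PySem.List.sorted2
    ((PySem.List.pyRange 0 (n : Int) 1).map
      (fun i => (PySem.List.pyGetD a i 0, PySem.List.pyGetD b i 0)))
    Prod.fst Prod.snd
  let merged := pvMerged segs
  let m : Int := merged.length
  if m ≤ 1 then 1 else
  let res := (PySem.List.pyRange 0 m 1).foldl (pvStepA merged m k) (0, 0)
  m - res.1

-- ===== PORT B =====
-- hand-rolled bisect_right, exactly Source B's while-loop; fuel = len(starts)+1 bounds the iterations
def pvBisectB (starts : List Int) (x : Int) : Int → Int → Nat → Int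
  | lo, _, 0 => lo
  | lo, hi, fuel + 1 =>
    if lo < hi then
      let mid := PySem.Int.floordiv (lo + hi) 2
      if PySem.List.pyGetD starts mid 0 ≤ x then pvBisectB starts x (mid + 1) hi fuel
      else pvBisectB starts x lo mid fuel
    else lo

-- the body of Source B's for-loop (state = best)
def pvStepB (merged : List (Int × Int)) (starts : List Int) (m k : Int) (best i : Int) : Int :=
  let x := (PySem.List.pyGetD merged i (0, 0)).2 + k
  let lo := pvBisectB starts x 0 m (starts.length + 1)
  let merges := lo - 1 - i
  if merges > best then merges else best

def minmConnectedZones_alt (a : List Int) (b : List Int) (k : Int) : Int :=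
  let n := a.length
  if n = 0 then 1 else
  let segs := PySem.List.sorted2 (a.zip b) Prod.fst Prod.snd
  let merged := pvMerged segs
  let m : Int := merged.length
  if m ≤ 1 then 1 else
  let starts := merged.map Prod.fst
  let best := (PySem.List.pyRange 0 m 1).foldl (pvStepB merged starts m k) 0
  m - best

-- ===== PRECONDITION & SPEC =====
-- Pre_ excludes exactly the inputs where A raises IndexError: b shorter than a (b[i] out of range).
def Pre_minmConnectedZones (a : List Int) (b : List Int) (k : Int) : Prop :=
  a.length ≤ b.length
instance (a : List Int) (b : List Int) (k : Int) : Decidable (Pre_minmConnectedZones a b k) := by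
  unfold Pre_minmConnectedZones; infer_instance

def pvWitness_minmConnectedZones : List Int × List Int × Int := ([1, 10, 20], [3, 12, 25], 5)

def Spec_minmConnectedZones (a : List Int) (b : List Int) (k : Int) (out : Int) : Prop :=
  out = minmConnectedZones_alt a b k
instance (a : List Int) (b : List Int) (k : Int) (out : Int) : Decidable (Spec_minmConnectedZones a b k out) := by
  unfold Spec_minmConnectedZones; infer_instance

-- ===== CLAIM (what is proved, stated in full; the proofs are below) =====
def Claim_equal_minmConnectedZones : Prop := ∀ (a : List Int) (b : List Int) (k : Int), Dom_minmConnectedZones a b k → Pre_minmConnectedZones a b k → Spec_minmConnectedZones a b k (minmConnectedZones a b k)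


-- ===== LEMMAS AND PROOFS =====
def pvLt2 (p q : Int × Int) : Bool :=
  decide (p.1 < q.1) || (!decide (q.1 < p.1) && decide (p.2 < q.2))

-- sorted2 with fst/snd keys is insertion sort by pvLt2
lemma pv_sorted2_eq (xs : List (Int × Int)) :
    PySem.List.sorted2 xs Prod.fst Prod.snd false
      = xs.foldl (fun acc x => PySem.List.insertBy pvLt2 x acc) [] := rfl

lemma pvLt2_asymm {p q : Int × Int} (h : pvLt2 p q = true) : pvLt2 q p = false := by
  simp [pvLt2] at *; omega

lemma pvLt2_trans {p q r : Int × Int} (h1 : pvLt2 p q = true) (h2 : pvLt2 q r = true) :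
    pvLt2 p r = true := by
  simp [pvLt2] at *; omega

def pvLe2 (p q : Int × Int) : Prop := pvLt2 q p = false

lemma pv_insertBy_pairwise (x : Int × Int) (ys : List (Int × Int))
    (h : ys.Pairwise pvLe2) : (PySem.List.insertBy pvLt2 x ys).Pairwise pvLe2 := by
  induction ys with
  | nil => simp [PySem.List.insertBy]
  | cons y ys ih =>
    rw [List.pairwise_cons] at h
    obtain ⟨hy, hys⟩ := h
    by_cases hc : pvLt2 x y = true
    · have : PySem.List.insertBy pvLt2 x (y :: ys) = x :: y :: ys := by
        simp [PySem.List.insertBy, hc]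
      rw [this, List.pairwise_cons, List.pairwise_cons]
      refine ⟨?_, hy, hys⟩
      intro z hz
      rcases List.mem_cons.mp hz with rfl | hz
      · exact pvLt2_asymm hc
      · -- z ∈ ys; pvLe2 x z i.e. pvLt2 z x = false
        have hzy : pvLt2 z y = false := hy z hz
        by_contra hzx
        simp only [pvLe2] at hzx
        have : pvLt2 z x = true := by revert hzx; cases pvLt2 z x <;> simp
        have := pvLt2_trans this hc
        rw [this] at hzy; exact absurd hzy (by simp)
    · have hc' : pvLt2 x y = false := by revert hc; cases pvLt2 x y <;> simp
      have : PySem.List.insertBy pvLt2 x (y :: ys) = y :: PySem.List.insertBy pvLt2 x ys := by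
        simp [PySem.List.insertBy, hc']
      rw [this, List.pairwise_cons]
      refine ⟨?_, ih hys⟩
      intro z hz
      rw [PySem.List.mem_insertBy] at hz
      rcases hz with rfl | hz
      · exact hc'
      · exact hy z hz

lemma pv_sorted2_pairwise (xs : List (Int × Int)) :
    (PySem.List.sorted2 xs Prod.fst Prod.snd false).Pairwise pvLe2 := by
  rw [pv_sorted2_eq]
  have H : ∀ (l : List (Int × Int)) (acc : List (Int × Int)), acc.Pairwise pvLe2 →
      (l.foldl (fun acc x => PySem.List.insertBy pvLt2 x acc) acc).Pairwise pvLe2 := by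
    intro l
    induction l with
    | nil => intro acc h; simpa using h
    | cons x l ih => intro acc h; exact ih _ (pv_insertBy_pairwise x acc h)
  exact H xs [] (by simp)

lemma pv_sorted2_pairwise_fst (xs : List (Int × Int)) :
    (PySem.List.sorted2 xs Prod.fst Prod.snd false).Pairwise (fun p q => p.1 ≤ q.1) := by
  refine (pv_sorted2_pairwise xs).imp ?_
  intro p q h
  simp [pvLe2, pvLt2] at h
  omega

-- L1: the indexed comprehension equals zip when b is long enough
lemma pv_segs_eq (a b : List Int) (h : a.length ≤ b.length) :
    (PySem.List.pyRange 0 (a.length : Int) 1).map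
      (fun i => (PySem.List.pyGetD a i 0, PySem.List.pyGetD b i 0)) = a.zip b := by
  apply List.ext_getElem
  · simp [PySem.List.length_pyRange_one]; omega
  · intro i h1 h2
    simp only [List.getElem_map, List.getElem_zip]
    rw [PySem.List.getElem_pyRange_one]
    have hi : i < a.length := by
      simp [PySem.List.length_pyRange_one] at h1; omega
    have : (0 : Int) + (i : Int) = ((i : Nat) : Int) := by omega
    rw [this, PySem.List.pyGetD_natCast, PySem.List.pyGetD_natCast]
    rw [List.getD_eq_getElem _ _ hi, List.getD_eq_getElem _ _ (by omega)]

-- L4: merge keeps zone starts nondecreasing, and all ≥ the pending start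
lemma pv_merge_pairwise : ∀ (rest : List (Int × Int)) (last : Int × Int),
    (∀ s ∈ rest, last.1 ≤ s.1) → rest.Pairwise (fun p q => p.1 ≤ q.1) →
    (pvMerge last rest).Pairwise (fun p q => p.1 ≤ q.1) ∧
      ∀ p ∈ pvMerge last rest, last.1 ≤ p.1 := by
  intro rest
  induction rest with
  | nil => intro last _ _; simp [pvMerge]
  | cons s t ih =>
    intro last hge hp
    rw [List.pairwise_cons] at hp
    obtain ⟨hs, ht⟩ := hp
    have hls : last.1 ≤ s.1 := hge s (by simp)
    simp only [pvMerge]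
    split_ifs with h1 h2
    · -- merge, extend end
      have := ih (last.1, s.2) (by intro z hz; exact le_trans hls (hs z hz)) ht
      exact this
    · have := ih last (by intro z hz; exact le_trans hls (hs z hz)) ht
      exact this
    · -- append: last :: merge s t
      have hih := ih s hs ht
      constructor
      · rw [List.pairwise_cons]
        exact ⟨fun p hp => le_trans hls (hih.2 p hp), hih.1⟩
      · intro p hp
        rcases List.mem_cons.mp hp with rfl | hp
        · exact le_refl p.1
        · exact le_trans hls (hih.2 p hp)

-- L5: the hand-rolled binary search computes bisect_right on a sorted list
lemma pv_bisect_eq (starts : List Int) (x : Int) (hs : starts.Pairwise (· ≤ ·)) :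
    ∀ (fuel : Nat) (lo hi : Int), 0 ≤ lo → hi ≤ (starts.length : Int) →
      lo ≤ hi → (hi - lo).toNat ≤ fuel →
      lo ≤ (PySem.List.bisectRight starts x : Int) →
      (PySem.List.bisectRight starts x : Int) ≤ hi →
      pvBisectB starts x lo hi fuel = (PySem.List.bisectRight starts x : Int) := by
  obtain ⟨hbr1, hbr2, hbr3⟩ := PySem.List.bisectRight_spec starts x hs
  intro fuel
  induction fuel with
  | zero =>
    intro lo hi _ _ hlh hf h1 h2
    simp only [pvBisectB]; omega
  | succ fuel ih =>
    intro lo hi hlo hhi hlh hf h1 h2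
    simp only [pvBisectB]
    by_cases hc : lo < hi
    · rw [if_pos hc]
      have hmid := PySem.Int.floordiv_two_mid_bounds (le_of_lt hc)
      have hmlt : PySem.Int.floordiv (lo + hi) 2 < hi :=
        (PySem.Int.floordiv_lt_iff_lt_mul (by omega)).mpr (by omega)
      set mid := PySem.Int.floordiv (lo + hi) 2 with hmiddef
      have hmr : 0 ≤ mid ∧ mid < (starts.length : Int) := by omega
      have hget : PySem.List.pyGetD starts mid 0 = starts[mid.toNat] := by
        exact PySem.List.pyGetD_eq_getElem starts 0 hmr.1 (by omega)
      by_cases hle : PySem.List.pyGetD starts mid 0 ≤ x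
      · rw [if_pos hle]
        have hmb : mid < (PySem.List.bisectRight starts x : Int) := by
          by_contra hnot
          have := hbr3 mid.toNat (by omega) (by omega)
          rw [hget] at hle; omega
        exact ih (mid + 1) hi (by omega) hhi (by omega) (by omega) (by omega) h2
      · rw [if_neg hle]
        have hmb : (PySem.List.bisectRight starts x : Int) ≤ mid := by
          by_contra hnot
          have := hbr2 mid.toNat (by omega) (by omega)
          rw [hget] at hle; omega
        exact ih lo mid hlo (by omega) (by omega) (by omega) h1 (by omega)
    · rw [if_neg hc]; omega

-- L6: the carried while-loop lands on max j (bisect_right - 1)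
lemma pv_adv_eq (merged : List (Int × Int)) (endi k : Int)
    (hs : (merged.map Prod.fst).Pairwise (· ≤ ·)) :
    ∀ (fuel : Nat) (j : Int), 0 ≤ j →
      ((PySem.List.bisectRight (merged.map Prod.fst) (endi + k) : Int) - 1 - j).toNat ≤ fuel →
      pvAdvA merged (merged.length : Int) endi k j fuel
        = max j ((PySem.List.bisectRight (merged.map Prod.fst) (endi + k) : Int) - 1) := by
  obtain ⟨hbr1, hbr2, hbr3⟩ := PySem.List.bisectRight_spec (merged.map Prod.fst) (endi + k) hs
  set br := (PySem.List.bisectRight (merged.map Prod.fst) (endi + k) : Int) with hbrdef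
  have hlen : (merged.map Prod.fst).length = merged.length := by simp
  intro fuel
  induction fuel with
  | zero =>
    intro j hj hf
    simp only [pvAdvA]; omega
  | succ fuel ih =>
    intro j hj hf
    simp only [pvAdvA]
    by_cases hc : j + 1 < (merged.length : Int) ∧
        (PySem.List.pyGetD merged (j + 1) (0, 0)).1 - endi ≤ k
    · rw [if_pos hc]
      obtain ⟨hc1, hc2⟩ := hc
      have hget : (PySem.List.pyGetD merged (j + 1) ((0 : Int), (0 : Int))).1
          = (merged.map Prod.fst)[(j + 1).toNat] := by
        rw [PySem.List.pyGetD_eq_getElem merged ((0 : Int), (0 : Int)) (by omega) (by omega)]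
        simp
      have hjb : j + 1 < br := by
        by_contra hnot
        have := hbr3 (j + 1).toNat (by omega) (by omega)
        rw [hget] at hc2; omega
      rw [ih (j + 1) (by omega) (by omega)]
      omega
    · rw [if_neg hc]
      push Not at hc
      have : br ≤ j + 1 := by
        by_contra hnot
        push Not at hnot
        have hc1 : j + 1 < (merged.length : Int) := by omega
        have := hc hc1
        have hget : (PySem.List.pyGetD merged (j + 1) ((0 : Int), (0 : Int))).1
            = (merged.map Prod.fst)[(j + 1).toNat] := by
          rw [PySem.List.pyGetD_eq_getElem merged ((0 : Int), (0 : Int)) (by omega) (by omega)]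
          simp
        have h2 := hbr2 (j + 1).toNat (by omega) (by omega)
        rw [hget] at this; omega
      omega

lemma pv_fold_eq (merged : List (Int × Int)) (k : Int)
    (hs : (merged.map Prod.fst).Pairwise (· ≤ ·)) :
    ∀ (cnt : Nat) (i : Int), 0 ≤ i → ((merged.length : Int) - i).toNat ≤ cnt →
    ∀ (bestA j bestB : Int), bestA = bestB → 0 ≤ bestA → 0 ≤ j → j ≤ i + bestA →
    ((PySem.List.pyRange i (merged.length : Int) 1).foldl (pvStepA merged (merged.length : Int) k) (bestA, j)).1
      = (PySem.List.pyRange i (merged.length : Int) 1).foldl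
          (pvStepB merged (merged.map Prod.fst) (merged.length : Int) k) bestB := by
  intro cnt
  induction cnt with
  | zero =>
    intro i hi hf bestA j bestB he _ _ _
    rw [PySem.List.pyRange_one_eq_nil (by omega)]
    simpa using he
  | succ cnt ih =>
    intro i hi hf bestA j bestB he hbA hj hjb
    by_cases hlt : i < (merged.length : Int)
    · rw [PySem.List.pyRange_one_cons hlt, List.foldl_cons, List.foldl_cons]
      set endi := (PySem.List.pyGetD merged i ((0 : Int), (0 : Int))).2 with hendi
      have hbrspec := PySem.List.bisectRight_spec (merged.map Prod.fst) (endi + k) hs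
      set br := (PySem.List.bisectRight (merged.map Prod.fst) (endi + k) : Int) with hbrdef
      have hbrle : br ≤ (merged.length : Int) := by
        have := hbrspec.1; simp at this; omega
      have hbr0 : 0 ≤ br := by positivity
      have hadv : pvAdvA merged (merged.length : Int) endi k (if j < i then i else j) merged.length
          = max (if j < i then i else j) (br - 1) := by
        apply pv_adv_eq merged endi k hs
        · split_ifs <;> omega
        · split_ifs <;> omega
      have hlo : pvBisectB (merged.map Prod.fst) (endi + k) 0 (merged.length : Int)
          ((merged.map Prod.fst).length + 1) = br := by
        apply pv_bisect_eq (merged.map Prod.fst) (endi + k) hs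
        · omega
        · simp
        · omega
        · simp
        · omega
        · exact hbrle
      simp only [pvStepA, pvStepB, ← hendi, hadv, hlo]
      apply ih (i + 1) (by omega) (by omega)
      all_goals split_ifs <;> omega
    · rw [PySem.List.pyRange_one_eq_nil (by omega)]
      simpa using he

lemma pv_merged_map_pairwise (segs : List (Int × Int))
    (h : segs.Pairwise (fun p q => p.1 ≤ q.1)) :
    ((pvMerged segs).map Prod.fst).Pairwise (· ≤ ·) := by
  cases segs with
  | nil => simp [pvMerged]
  | cons s0 rest =>
    rw [List.pairwise_cons] at h
    have := pv_merge_pairwise rest s0 h.1 h.2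
    exact List.pairwise_map.mpr this.1


-- ===== VERDICT (by name: the statement is the Claim_ definition above) =====
theorem minmConnectedZones_spec : Claim_equal_minmConnectedZones := by
  intro a b k hdom hpre
  unfold Spec_minmConnectedZones minmConnectedZones minmConnectedZones_alt
  by_cases h0 : a.length = 0
  · simp [h0]
  · simp only [if_neg h0]
    rw [pv_segs_eq a b hpre]
    set segs := PySem.List.sorted2 (a.zip b) Prod.fst Prod.snd with hsegs
    set merged := pvMerged segs with hmerged
    by_cases h1 : (merged.length : Int) ≤ 1
    · simp only [if_pos h1]
    · simp only [if_neg h1]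
      have hs : (merged.map Prod.fst).Pairwise (· ≤ ·) :=
        pv_merged_map_pairwise segs (pv_sorted2_pairwise_fst _)
      rw [pv_fold_eq merged k hs merged.length 0 (by omega) (by omega) 0 0 0 rfl
        (by omega) (by omega) (by omega)]
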